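-- pv_equiv track=rewrite | github.com/josh-W42/advent_of_code_2024 | day_7/main.py | equation_is_possible
-- ===== SOURCE A (Python) =====
-- def equation_is_possible(target: int, options: list[int], solution: int, index: int):
--     if solution > target:
--         return False
--     if solution == target:
--         return True
--     if index >= len(options):
--         return False
--
--     add_next = equation_is_possible(target, options, solution + options[index], index + 1)
--     multiply_next = equation_is_possible(target, options, solution * options[index], index + 1)
--
--     return add_next or multiply_next
-- ===== SOURCE B (Python) =====
-- def equation_is_possible(target: int, options: list[int], solution: int, index: int):
--     # Forward set-based DP over reachable partial values, instead of 2^n recursion.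
--     current = {solution}
--     i = index
--     n = len(options)
--     while True:
--         if target in current:
--             return True
--         current = {s for s in current if s < target}
--         if i >= n or not current:
--             return False
--         o = options[i]
--         current = {r for s in current for r in (s + o, s * o)}
--         i += 1
-- ===== Notes on version B (the rewrite author's own statement) =====
-- stated objective: alternative
-- what changed: Replaces A's depth-first two-way branching recursion by an iterative forward DP that carries the deduplicated set of partial values reachable at each position (values past the target dropped), checking for the target level by level instead of exploring one operator chain at a time.
import Mathlib
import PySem

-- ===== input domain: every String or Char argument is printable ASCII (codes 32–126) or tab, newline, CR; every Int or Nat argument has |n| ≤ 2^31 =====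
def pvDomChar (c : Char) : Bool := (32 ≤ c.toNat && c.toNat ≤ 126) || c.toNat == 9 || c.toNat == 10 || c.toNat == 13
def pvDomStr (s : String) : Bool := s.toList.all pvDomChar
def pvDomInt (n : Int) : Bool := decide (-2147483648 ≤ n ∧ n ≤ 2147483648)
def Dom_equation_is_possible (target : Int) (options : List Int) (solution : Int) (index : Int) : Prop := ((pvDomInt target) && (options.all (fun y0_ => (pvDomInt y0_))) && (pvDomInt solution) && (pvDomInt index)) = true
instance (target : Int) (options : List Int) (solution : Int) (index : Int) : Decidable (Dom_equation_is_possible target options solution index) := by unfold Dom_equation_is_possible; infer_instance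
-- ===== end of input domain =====

-- B replaces A's depth-first two-way branching recursion by an iterative forward DP over the
-- deduplicated set of reachable partial values (values > target dropped); same return value.

-- ===== PORT A =====
def equation_is_possible (target : Int) (options : List Int) (solution : Int) (index : Int) : Bool :=
  if solution > target then false
  else if solution = target then true
  else if index ≥ (options.length : Int) then false
  else
    match PySem.List.pyGet? options index with
    | none => false   -- Python raises IndexError here; excluded by Pre_
    | some o =>
      let add_next := equation_is_possible target options (solution + o) (index + 1)
      let multiply_next := equation_is_possible target options (solution * o) (index + 1)
      add_next || multiply_next
termination_by ((options.length : Int) - index).toNat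
decreasing_by all_goals omega

-- ===== PORT B =====
-- B's while-loop: state = (current set of reachable values, position i)
def eqAltLoop (target : Int) (options : List Int) (current : PySem.Set Int) (i : Int) : Bool :=
  if PySem.Set.contains current target then true
  else
    let current' := current.filter (fun s => decide (s < target))
    if i ≥ (options.length : Int) then false
    else if current'.isEmpty then false
    else
      match PySem.List.pyGet? options i with
      | none => false   -- Python raises IndexError here; excluded by Pre_
      | some o =>
        eqAltLoop target options
          (PySem.Set.ofList (current'.flatMap (fun s => [s + o, s * o]))) (i + 1)
termination_by ((options.length : Int) - i).toNat
decreasing_by all_goals omega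

def equation_is_possible_alt (target : Int) (options : List Int) (solution : Int) (index : Int) : Bool :=
  eqAltLoop target options (PySem.Set.ofList [solution]) index

-- ===== PRECONDITION & SPEC =====
-- Pre_ excludes exactly the inputs on which Python A raises IndexError
-- (index below -len(options) while solution is still short of target); B raises there too.
def Pre_equation_is_possible (target : Int) (options : List Int) (solution : Int) (index : Int) : Prop :=
  target ≤ solution ∨ -(options.length : Int) ≤ index
instance (target : Int) (options : List Int) (solution : Int) (index : Int) : Decidable (Pre_equation_is_possible target options solution index) := by unfold Pre_equation_is_possible; infer_instance

def pvWitness_equation_is_possible : Int × List Int × Int × Int := (292, [11, 6, 16, 20], 0, 0)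

def Spec_equation_is_possible (target : Int) (options : List Int) (solution : Int) (index : Int) (out : Bool) : Prop := out = equation_is_possible_alt target options solution index
instance (target : Int) (options : List Int) (solution : Int) (index : Int) (out : Bool) : Decidable (Spec_equation_is_possible target options solution index out) := by unfold Spec_equation_is_possible; infer_instance

-- ===== CLAIM (what is proved, stated in full; the proofs are below) =====
def Claim_equal_equation_is_possible : Prop := ∀ (target : Int) (options : List Int) (solution : Int) (index : Int), Dom_equation_is_possible target options solution index → Pre_equation_is_possible target options solution index → Spec_equation_is_possible target options solution index (equation_is_possible target options solution index)

-- ===== LEMMAS AND PROOFS =====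

-- Loop invariant: B's set-valued loop decides "some value in the current set can still reach target".
lemma eqAltLoop_eq_any (target : Int) (options : List Int) (cur : PySem.Set Int) (i : Int) :
    eqAltLoop target options cur i
      = cur.any (fun s => equation_is_possible target options s i) := by
  generalize hk : ((options.length : Int) - i).toNat = k
  induction k generalizing cur i with
  | zero =>
    have hi : i ≥ (options.length : Int) := by omega
    rw [eqAltLoop]
    apply Bool.eq_iff_iff.mpr
    by_cases hc : PySem.Set.contains cur target = true
    · simp only [if_pos hc, List.any_eq_true, true_iff]
      simp only [PySem.Set.contains, List.contains_eq_mem, decide_eq_true_eq] at hc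
      exact ⟨target, hc, by rw [equation_is_possible]; simp⟩
    · simp only [if_neg hc, if_pos hi, List.any_eq_true]
      simp only [PySem.Set.contains, List.contains_eq_mem, decide_eq_true_eq] at hc
      refine iff_of_false (by simp) ?_
      rintro ⟨s, hs, hA⟩
      rw [equation_is_possible] at hA
      split_ifs at hA with h1 h2
      · exact hc (h2 ▸ hs)
  | succ k ih =>
    rw [eqAltLoop]
    apply Bool.eq_iff_iff.mpr
    by_cases hc : PySem.Set.contains cur target = true
    · simp only [if_pos hc, List.any_eq_true, true_iff]
      simp only [PySem.Set.contains, List.contains_eq_mem, decide_eq_true_eq] at hc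
      exact ⟨target, hc, by rw [equation_is_possible]; simp⟩
    · simp only [if_neg hc]
      simp only [PySem.Set.contains, List.contains_eq_mem, decide_eq_true_eq] at hc
      by_cases hlen : i ≥ (options.length : Int)
      · simp only [if_pos hlen, List.any_eq_true]
        refine iff_of_false (by simp) ?_
        rintro ⟨s, hs, hA⟩
        rw [equation_is_possible] at hA
        split_ifs at hA with h1 h2
        · exact hc (h2 ▸ hs)
      · simp only [if_neg hlen]
        by_cases hemp : (cur.filter (fun s => decide (s < target))).isEmpty = true
        · simp only [if_pos hemp, List.any_eq_true]
          refine iff_of_false (by simp) ?_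
          rintro ⟨s, hs, hA⟩
          rw [equation_is_possible] at hA
          split_ifs at hA with h1 h2
          · exact hc (h2 ▸ hs)
          · have hslt : s < target := by omega
            have hmem : s ∈ cur.filter (fun s => decide (s < target)) := by
              simp [List.mem_filter, hs, hslt]
            rw [List.isEmpty_iff] at hemp
            simp [hemp] at hmem
        · simp only [if_neg hemp]
          cases hg : PySem.List.pyGet? options i with
          | none =>
            refine iff_of_false (by simp) ?_
            simp only [List.any_eq_true]
            rintro ⟨s, hs, hA⟩
            rw [equation_is_possible] at hA
            split_ifs at hA with h1 h2
            · exact hc (h2 ▸ hs)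
            · rw [hg] at hA; simp at hA
          | some o =>
            have hk' : ((options.length : Int) - (i + 1)).toNat = k := by omega
            show eqAltLoop target options
                (PySem.Set.ofList ((cur.filter (fun s => decide (s < target))).flatMap
                  (fun s => [s + o, s * o]))) (i + 1) = true
              ↔ cur.any (fun s => equation_is_possible target options s i) = true
            rw [ih _ _ hk']
            simp only [List.any_eq_true, PySem.Set.mem_ofList, List.mem_flatMap,
              List.mem_filter, decide_eq_true_eq, List.mem_cons, List.not_mem_nil, or_false]
            constructor
            · rintro ⟨x, ⟨s, ⟨hs, hslt⟩, hx⟩, hA⟩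
              refine ⟨s, hs, ?_⟩
              rw [equation_is_possible]
              have h1 : ¬ s > target := by omega
              have h2 : ¬ s = target := by omega
              rw [if_neg h1, if_neg h2, if_neg hlen, hg]
              rcases hx with h | h <;> subst h <;> simp [hA]
            · rintro ⟨s, hs, hA⟩
              rw [equation_is_possible] at hA
              split_ifs at hA with h1 h2
              · exact absurd (h2 ▸ hs) hc
              · rw [hg] at hA
                simp only [Bool.or_eq_true] at hA
                rcases hA with hA | hA
                · exact ⟨s + o, ⟨s, ⟨hs, by omega⟩, Or.inl rfl⟩, hA⟩
                · exact ⟨s * o, ⟨s, ⟨hs, by omega⟩, Or.inr rfl⟩, hA⟩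

theorem equation_is_possible_spec : Claim_equal_equation_is_possible := by
  intro target options solution index _ _
  unfold Spec_equation_is_possible equation_is_possible_alt
  rw [eqAltLoop_eq_any]
  simp [PySem.Set.ofList]
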